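-- pv_equiv track=rewrite | github.com/MANY-35/OneQuestionADay | programmers/250136/solution.py | solution
-- ===== SOURCE A (Python) =====
-- def solution(land):
--     sumArr = [0 for _ in range(len(land[0]))]
--     for y in range(len(land)):
--         for x in range(len(land[0])):
--             if land[y][x] == 0:
--                 continue
--             visit = set()
--             sum = [0]
--             bfs(land, x, y, visit, sum)
--             for i in visit:
--                 sumArr[i-1] += sum[0]
--     return max(sumArr)
--
-- def bfs(land, x, y, visit, sum):
--     visit.add(x)
--     land[y][x] = 0
--     sum[0] += 1
--
--     if y < len(land)-1:
--         if land[y+1][x] == 1: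
--             bfs(land, x, y+1, visit, sum)
--     if y > 0:
--         if land[y-1][x] == 1:
--             bfs(land, x, y-1, visit, sum)
--     if x > 0:
--         if land[y][x-1] == 1:
--             bfs(land, x-1, y, visit, sum)
--     if x < len(land[0])-1:
--         if land[y][x+1] == 1:
--             bfs(land, x+1, y, visit, sum)
-- ===== SOURCE B (Python) =====
-- def solution(land):
--     # Iterative flood fill with an explicit stack instead of recursive DFS.
--     # Mutates land in place (zeroes visited cells), like the original.
--     h = len(land)
--     w = len(land[0])
--     sumArr = [0] * w
--     for y in range(h):
--         for x in range(w):
--             if land[y][x] == 0: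
--                 continue
--             cols = set()
--             size = 0
--             stack = [(x, y)]
--             while stack:
--                 cx, cy = stack.pop()
--                 if land[cy][cx] == 0:
--                     continue
--                 land[cy][cx] = 0
--                 cols.add(cx)
--                 size += 1
--                 # pushed so that pop order is down, up, left, right
--                 if cx < w - 1 and land[cy][cx + 1] == 1:
--                     stack.append((cx + 1, cy))
--                 if cx > 0 and land[cy][cx - 1] == 1:
--                     stack.append((cx - 1, cy))
--                 if cy > 0 and land[cy - 1][cx] == 1:
--                     stack.append((cx, cy - 1))
--                 if cy < h - 1 and land[cy + 1][cx] == 1: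
--                     stack.append((cx, cy + 1))
--             for c in cols:
--                 sumArr[c - 1] += size
--     return max(sumArr)
-- ===== Notes on version B (the rewrite author's own statement) =====
-- stated objective: idiomatic
-- what changed: A's recursive 4-way DFS helper (mutating a shared visit-set and a one-element sum list) is replaced by an iterative flood fill driven by an explicit stack with a pop-time zero check and push-time ==1 guards.
-- outside the precondition, e.g. on solution([]): A raises IndexError, B raises IndexError
import Mathlib
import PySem

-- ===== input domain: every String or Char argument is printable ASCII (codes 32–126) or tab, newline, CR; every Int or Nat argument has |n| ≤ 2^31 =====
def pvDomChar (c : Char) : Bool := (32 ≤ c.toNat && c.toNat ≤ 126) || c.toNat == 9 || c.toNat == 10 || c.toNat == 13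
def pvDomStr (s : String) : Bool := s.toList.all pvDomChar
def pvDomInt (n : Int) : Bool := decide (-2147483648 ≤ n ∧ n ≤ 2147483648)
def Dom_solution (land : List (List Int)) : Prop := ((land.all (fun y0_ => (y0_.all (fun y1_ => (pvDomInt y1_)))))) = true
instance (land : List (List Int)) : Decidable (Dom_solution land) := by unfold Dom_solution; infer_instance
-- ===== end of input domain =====

-- B replaces A's recursive DFS by an explicit-stack flood fill (same cost); both Pythons zero `land`
-- in place — the theorems below are about the RETURN value (the final grids coincide as well, but only
-- the return value is claimed).

-- Shared cell helpers: land[y][x] read/write via the PySem primitives (exact wherever Python returns;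
-- on an out-of-range index, where Python raises — excluded by Pre_ —, they return a default / leave the
-- grid unchanged).
def pvCell (g : List (List Int)) (y x : Int) : Int :=
  PySem.List.pyGetD (PySem.List.pyGetD g y []) x 0

def pvSetCell (g : List (List Int)) (y x : Int) (v : Int) : List (List Int) :=
  PySem.List.pySetD g y (PySem.List.pySetD (PySem.List.pyGetD g y []) x v)

-- len(land[0]) (0 for an empty grid, where Python raises — excluded by Pre_)
def pvW (g : List (List Int)) : Nat := (PySem.List.pyGetD g 0 []).length

-- number of nonzero cells: fuel bound for A's recursion / termination measure for B's loop
def nz (g : List (List Int)) : Nat := (g.map (fun row => row.countP (fun a => a != 0))).sum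

-- sumArr[i] += d with Python's negative-index wrap (exact for -len ≤ i < len; Pre_ keeps i in range)
def pvAddAt (arr : List Int) (i : Int) (d : Int) : List Int :=
  PySem.List.pySetD arr i (PySem.List.pyGetD arr i 0 + d)





-- cited by floodB's decreasing_by: zeroing a nonzero cell decreases the nonzero count


theorem pyIdx?_lt {n : Nat} {i : Int} {k : Nat} (h : PySem.List.pyIdx? n i = some k) : k < n := by
  unfold PySem.List.pyIdx? at h
  split_ifs at h <;> simp_all <;> omega

theorem pyIdx?_zero (i : Int) : PySem.List.pyIdx? 0 i = none := by
  unfold PySem.List.pyIdx?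
  split_ifs <;> first | rfl | omega

theorem pyGetD_of_idx {α : Type} (xs : List α) (i : Int) (d : α) (k : Nat)
    (h : PySem.List.pyIdx? xs.length i = some k) : PySem.List.pyGetD xs i d = xs.getD k d := by
  have hk := pyIdx?_lt h
  simp [PySem.List.pyGetD, PySem.List.pyGet?, h, List.getD_eq_getElem?_getD]

theorem pyGetD_of_idx_none {α : Type} (xs : List α) (i : Int) (d : α)
    (h : PySem.List.pyIdx? xs.length i = none) : PySem.List.pyGetD xs i d = d := by
  simp [PySem.List.pyGetD, PySem.List.pyGet?, h]

theorem pySetD_of_idx {α : Type} (xs : List α) (i : Int) (v : α) (k : Nat)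
    (h : PySem.List.pyIdx? xs.length i = some k) : PySem.List.pySetD xs i v = xs.set k v := by
  simp [PySem.List.pySetD, PySem.List.pySet?, h]

theorem cell_valid (g : List (List Int)) (y x : Int) (h : pvCell g y x ≠ 0) :
    ∃ (j i : Nat), PySem.List.pyIdx? g.length y = some j ∧
      PySem.List.pyIdx? (g.getD j []).length x = some i ∧
      i < (g.getD j []).length ∧ (g.getD j [])[i]? ≠ some 0 ∧
      pvSetCell g y x 0 = g.set j ((g.getD j []).set i 0) := by
  unfold pvCell at h
  cases hj : PySem.List.pyIdx? g.length y with
  | none =>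
    rw [pyGetD_of_idx_none _ _ _ hj] at h
    rw [pyGetD_of_idx_none] at h
    · exact absurd rfl h
    · exact pyIdx?_zero x
  | some j =>
    rw [pyGetD_of_idx _ _ _ _ hj] at h
    cases hi : PySem.List.pyIdx? (g.getD j []).length x with
    | none => rw [pyGetD_of_idx_none _ _ _ hi] at h; exact absurd rfl h
    | some i =>
      rw [pyGetD_of_idx _ _ _ _ hi] at h
      have hilt := pyIdx?_lt hi
      refine ⟨j, i, rfl, hi, hilt, ?_, ?_⟩
      · rw [List.getD_eq_getElem?_getD] at h
        rw [List.getElem?_eq_getElem hilt] at h ⊢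
        simpa using h
      · unfold pvSetCell
        rw [pyGetD_of_idx _ _ _ _ hj, pySetD_of_idx _ _ _ _ hi, pySetD_of_idx _ _ _ _ hj]

theorem countP_set_zero_lt : ∀ (l : List Int) (i : Nat), i < l.length → l[i]? ≠ some 0 →
    (l.set i 0).countP (fun a => a != 0) < l.countP (fun a => a != 0) := by
  intro l
  induction l with
  | nil => intro i h; simp at h
  | cons a t ih =>
    intro i h hne
    cases i with
    | zero =>
      simp at hne
      simp [hne]
    | succ j =>
      simp at h hne
      have := ih j h hne
      simp [List.countP_cons]
      omega

theorem nz_set_row : ∀ (g : List (List Int)) (j : Nat) (r : List Int), j < g.length →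
    nz (g.set j r) + (g.getD j []).countP (fun a => a != 0)
      = nz g + r.countP (fun a => a != 0) := by
  intro g
  induction g with
  | nil => intro j r h; simp at h
  | cons r0 t ih =>
    intro j r h
    cases j with
    | zero => simp [nz]; omega
    | succ j' =>
      simp at h
      have := ih j' r h
      simp [nz] at this ⊢
      omega

theorem nz_setCell_lt (g : List (List Int)) (y x : Int) (h : pvCell g y x ≠ 0) :
    nz (pvSetCell g y x 0) < nz g := by
  obtain ⟨j, i, hj, hi, hilt, hne, heq⟩ := cell_valid g y x h
  have hjl := pyIdx?_lt hj
  have h1 := nz_set_row g j ((g.getD j []).set i 0) hjl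
  have h2 := countP_set_zero_lt (g.getD j []) i hilt hne
  rw [heq]
  omega

-- ===== PORT A =====
-- the recursive bfs helper; `fuel` is a termination guard only (solution passes nz g + 1, which is
-- never exhausted: every recursive call is into a cell equal to 1, which the call zeroes)
def bfsA (fuel : Nat) (g : List (List Int)) (x y : Int) (visit : PySem.Set Int) (cnt : Int) :
    List (List Int) × PySem.Set Int × Int :=
  match fuel with
  | 0 => (g, visit, cnt)
  | Nat.succ f =>
    let v1 := visit.add x
    let g1 := pvSetCell g y x 0
    let c1 := cnt + 1
    let s1 := if y < (g1.length : Int) - 1 ∧ pvCell g1 (y+1) x = 1 then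
                bfsA f g1 x (y+1) v1 c1 else (g1, v1, c1)
    let s2 := if 0 < y ∧ pvCell s1.1 (y-1) x = 1 then
                bfsA f s1.1 x (y-1) s1.2.1 s1.2.2 else s1
    let s3 := if 0 < x ∧ pvCell s2.1 y (x-1) = 1 then
                bfsA f s2.1 (x-1) y s2.2.1 s2.2.2 else s2
    if x < (pvW s3.1 : Int) - 1 ∧ pvCell s3.1 y (x+1) = 1 then
      bfsA f s3.1 (x+1) y s3.2.1 s3.2.2 else s3

-- `for i in visit: sumArr[i-1] += sum[0]` — Python iterates the set in hash order; the result does not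
-- depend on the order (distinct indices, commuting +=), so folding in insertion order is exact.
def solution (land : List (List Int)) : Int :=
  let fin := (List.range land.length).foldl (fun st (y : Nat) =>
      (List.range (pvW st.1)).foldl (fun st2 (x : Nat) =>
        if pvCell st2.1 (y : Int) (x : Int) = 0 then st2
        else
          let r := bfsA (nz st2.1 + 1) st2.1 (x : Int) (y : Int) PySem.Set.empty 0
          (r.1, r.2.1.foldl (fun arr i => pvAddAt arr (i - 1) r.2.2) st2.2)) st)
    (land, List.replicate (pvW land) (0 : Int))
  (PySem.List.max? fin.2 (fun v => v)).getD 0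

-- ===== PORT B =====
-- iterative flood fill: explicit stack (head = top), pop-time zero check, push guarded by == 1
def floodB (g : List (List Int)) (stack : List (Int × Int)) (cols : PySem.Set Int) (size : Int) :
    List (List Int) × PySem.Set Int × Int :=
  match stack with
  | [] => (g, cols, size)
  | (cx, cy) :: rest =>
    if h0 : pvCell g cy cx = 0 then floodB g rest cols size
    else
      let g' := pvSetCell g cy cx 0
      let st1 := if cx < (pvW g' : Int) - 1 ∧ pvCell g' cy (cx+1) = 1 then (cx+1, cy) :: rest else rest
      let st2 := if 0 < cx ∧ pvCell g' cy (cx-1) = 1 then (cx-1, cy) :: st1 else st1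
      let st3 := if 0 < cy ∧ pvCell g' (cy-1) cx = 1 then (cx, cy-1) :: st2 else st2
      let st4 := if cy < (g'.length : Int) - 1 ∧ pvCell g' (cy+1) cx = 1 then (cx, cy+1) :: st3 else st3
      floodB g' st4 (cols.add cx) (size + 1)
termination_by (nz g, stack.length)
decreasing_by
  · exact Prod.Lex.right _ (by simp)
  · exact Prod.Lex.left _ _ (nz_setCell_lt g cy cx h0)

def solution_alt (land : List (List Int)) : Int :=
  let h := land.length
  let w := pvW land
  let fin := (List.range h).foldl (fun st (y : Nat) =>
      (List.range w).foldl (fun st2 (x : Nat) =>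
        if pvCell st2.1 (y : Int) (x : Int) = 0 then st2
        else
          let r := floodB st2.1 [((x : Int), (y : Int))] PySem.Set.empty 0
          (r.1, r.2.1.foldl (fun arr c => pvAddAt arr (c - 1) r.2.2) st2.2)) st)
    (land, List.replicate w (0 : Int))
  (PySem.List.max? fin.2 (fun v => v)).getD 0

-- ===== PRECONDITION & SPEC =====
-- Pre_ excludes exactly the inputs on which Python A raises: an empty grid (land[0] → IndexError),
-- an empty first row (max([]) → ValueError), and a row shorter than land[0] (IndexError in the scan).
def Pre_solution (land : List (List Int)) : Prop :=
  land ≠ [] ∧ land.getD 0 [] ≠ [] ∧ ∀ row ∈ land, (land.getD 0 []).length ≤ row.length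

instance (land : List (List Int)) : Decidable (Pre_solution land) := by
  unfold Pre_solution; infer_instance

def pvWitness_solution : List (List Int) := [[1, 0], [1, 1]]

def Spec_solution (land : List (List Int)) (out : Int) : Prop := out = solution_alt land
instance (land : List (List Int)) (out : Int) : Decidable (Spec_solution land out) := by
  unfold Spec_solution; infer_instance

-- ===== CLAIM (what is proved, stated in full; the proofs are below) =====
def Claim_equal_solution : Prop := ∀ (land : List (List Int)), Dom_solution land →
  Pre_solution land → Spec_solution land (solution land)

-- ===== LEMMAS AND PROOFS =====

theorem pySetD_of_idx_none {α : Type} (xs : List α) (i : Int) (v : α)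
    (h : PySem.List.pyIdx? xs.length i = none) : PySem.List.pySetD xs i v = xs := by
  simp [PySem.List.pySetD, PySem.List.pySet?, h]


-- grid evolution: every cell is either unchanged or has become 0
def GExt (g g' : List (List Int)) : Prop :=
  ∀ (y x : Int), pvCell g' y x = pvCell g y x ∨ pvCell g' y x = 0

theorem gext_refl (g : List (List Int)) : GExt g g := fun _ _ => Or.inl rfl

theorem gext_trans {g1 g2 g3 : List (List Int)} (h12 : GExt g1 g2) (h23 : GExt g2 g3) : GExt g1 g3 := by
  intro y x
  rcases h23 y x with h | h
  · rw [h]; exact h12 y x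
  · exact Or.inr h

theorem countP_set_zero_le : ∀ (l : List Int) (i : Nat),
    (l.set i (0:Int)).countP (fun a => a != 0) ≤ l.countP (fun a => a != 0) := by
  intro l
  induction l with
  | nil => intro i; simp
  | cons a t ih =>
    intro i
    cases i with
    | zero => simp [List.countP_cons]
    | succ j => simp [List.countP_cons]; have := ih j; omega

theorem nz_setCell_le (g : List (List Int)) (y x : Int) :
    nz (pvSetCell g y x 0) ≤ nz g := by
  by_cases h : pvCell g y x = 0
  · -- the write may still happen (writing 0 over a 0) or be a no-op; handle by cases on indices
    unfold pvSetCell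
    cases hj : PySem.List.pyIdx? g.length y with
    | none => rw [pySetD_of_idx_none _ _ _ hj]
    | some j =>
      rw [pyGetD_of_idx _ _ _ _ hj]
      cases hi : PySem.List.pyIdx? (g.getD j []).length x with
      | none =>
        rw [pySetD_of_idx_none _ _ _ hi, pySetD_of_idx _ _ _ _ hj]
        have := nz_set_row g j (g.getD j []) (pyIdx?_lt hj)
        omega
      | some i =>
        rw [pySetD_of_idx _ _ _ _ hi, pySetD_of_idx _ _ _ _ hj]
        have h1 := nz_set_row g j ((g.getD j []).set i 0) (pyIdx?_lt hj)
        have h2 := countP_set_zero_le (g.getD j []) i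
        omega
  · exact Nat.le_of_lt (nz_setCell_lt g y x h)

theorem dims_setCell (g : List (List Int)) (y x v : Int) :
    (pvSetCell g y x v).length = g.length ∧ pvW (pvSetCell g y x v) = pvW g := by
  unfold pvSetCell pvW
  cases hj : PySem.List.pyIdx? g.length y with
  | none => rw [pySetD_of_idx_none _ _ _ hj]; exact ⟨rfl, rfl⟩
  | some j =>
    rw [pySetD_of_idx _ _ _ _ hj]
    constructor
    · simp
    · -- length of row 0 after the write
      cases h0 : PySem.List.pyIdx? (g.set j (PySem.List.pySetD (PySem.List.pyGetD g y []) x v)).length 0 with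
      | none =>
        rw [pyGetD_of_idx_none _ _ _ h0]
        rw [List.length_set] at h0
        rw [pyGetD_of_idx_none _ _ _ h0]
      | some k =>
        rw [pyGetD_of_idx _ _ _ _ h0]
        rw [List.length_set] at h0
        rw [pyGetD_of_idx _ _ _ _ h0]
        have hk := pyIdx?_lt h0
        by_cases hkj : k = j
        · subst hkj
          rw [pyGetD_of_idx _ _ _ _ hj]
          simp [List.getD_eq_getElem?_getD, hk]
        · simp [List.getD_eq_getElem?_getD, List.getElem?_set_ne (by omega : j ≠ k)]

theorem pvCell_set_row (g : List (List Int)) (j : Nat) (r : List Int) (hj : j < g.length)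
    (y' x' : Int) :
    pvCell (g.set j r) y' x' =
      (if PySem.List.pyIdx? g.length y' = some j then PySem.List.pyGetD r x' 0
       else pvCell g y' x') := by
  unfold pvCell
  have hlen : (g.set j r).length = g.length := by simp
  cases hj' : PySem.List.pyIdx? g.length y' with
  | none =>
    rw [pyGetD_of_idx_none (g.set j r) y' [] (by rw [hlen]; exact hj'),
        pyGetD_of_idx_none g y' [] hj']
    have h0 : PySem.List.pyIdx? ([] : List Int).length x' = none := pyIdx?_zero x'
    rw [pyGetD_of_idx_none _ _ _ h0]
    simp
  | some j' =>
    rw [pyGetD_of_idx (g.set j r) y' [] j' (by rw [hlen]; exact hj'),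
        pyGetD_of_idx _ _ _ _ hj']
    by_cases hjj : j' = j
    · subst hjj
      simp [List.getD_eq_getElem?_getD, hj]
    · have := pyIdx?_lt hj'
      simp only [List.getD_eq_getElem?_getD]
      rw [List.getElem?_set_ne (by omega : j ≠ j')]
      simp [hjj]

theorem gext_setCell (g : List (List Int)) (y x : Int) : GExt g (pvSetCell g y x 0) := by
  intro y' x'
  unfold pvSetCell
  cases hj : PySem.List.pyIdx? g.length y with
  | none => rw [pySetD_of_idx_none _ _ _ hj]; exact Or.inl rfl
  | some j =>
    rw [pyGetD_of_idx _ _ _ _ hj]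
    have hjl := pyIdx?_lt hj
    cases hi : PySem.List.pyIdx? (g.getD j []).length x with
    | none =>
      rw [pySetD_of_idx_none _ _ _ hi, pySetD_of_idx _ _ _ _ hj]
      rw [pvCell_set_row g j _ hjl]
      split_ifs with hc
      · left
        obtain ⟨j0, rfl⟩ : ∃ j0, j0 = j := ⟨j, rfl⟩
        unfold pvCell
        rw [pyGetD_of_idx _ _ _ _ hc]
      · exact Or.inl rfl
    | some i =>
      rw [pySetD_of_idx _ _ _ _ hi, pySetD_of_idx _ _ _ _ hj]
      rw [pvCell_set_row g j _ hjl]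
      split_ifs with hc
      · have hil := pyIdx?_lt hi
        have hleni : ((g.getD j []).set i 0).length = (g.getD j []).length := by simp
        cases hi' : PySem.List.pyIdx? (g.getD j []).length x' with
        | none =>
          rw [pyGetD_of_idx_none]
          · right; rfl
          · rw [hleni]; exact hi'
        | some i' =>
          rw [pyGetD_of_idx ((g.getD j []).set i 0) x' 0 i' (by rw [hleni]; exact hi')]
          by_cases hii : i' = i
          · subst hii
            right
            rw [List.getD_eq_getElem?_getD, List.getElem?_set_self hil]
            rfl
          · left
            have := pyIdx?_lt hi'
            unfold pvCell
            rw [pyGetD_of_idx _ _ _ _ hc]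
            simp only [List.getD_eq_getElem?_getD]
            rw [List.getElem?_set_ne (by omega : i ≠ i')]
            simp only [← List.getD_eq_getElem?_getD]
            rw [pyGetD_of_idx _ _ _ _ hi']
      · exact Or.inl rfl







theorem nz_pos (g : List (List Int)) (y x : Int) (h : pvCell g y x ≠ 0) : 1 ≤ nz g :=
  Nat.lt_of_le_of_lt (Nat.zero_le _) (nz_setCell_lt g y x h)

-- fuel irrelevance for bfsA

-- the sequential-recursion view of a list of pending cells
def runSeq (f : Nat) (g : List (List Int)) (L : List (Int × Int)) (v : PySem.Set Int) (c : Int) :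
    List (List Int) × PySem.Set Int × Int :=
  match L with
  | [] => (g, v, c)
  | (x, y) :: L' =>
    if pvCell g y x = 1 then
      let s := bfsA f g x y v c
      runSeq f s.1 L' s.2.1 s.2.2
    else runSeq f g L' v c

def nbrsAll (g : List (List Int)) (x y : Int) : List (Int × Int) :=
  (if y < (g.length : Int) - 1 then [(x, y+1)] else []) ++
  (if 0 < y then [(x, y-1)] else []) ++
  (if 0 < x then [(x-1, y)] else []) ++
  (if x < (pvW g : Int) - 1 then [(x+1, y)] else [])







-- unfolding A's recursion one level into the sequential view

def inv (g : List (List Int)) (S : List (Int × Int)) : Prop :=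
  ∀ p ∈ S, pvCell g p.2 p.1 = 0 ∨ pvCell g p.2 p.1 = 1

-- the stack machine computes the sequential recursion




set_option maxHeartbeats 2000000 in
theorem bfsA_unfold_aux (f : Nat)
    (hW : ∀ g x y (v : PySem.Set Int) (c : Int), pvW (bfsA f g x y v c).1 = pvW g)
    (g : List (List Int)) (x y : Int) (v : PySem.Set Int) (c : Int) :
    bfsA (f + 1) g x y v c =
      runSeq f (pvSetCell g y x 0) (nbrsAll (pvSetCell g y x 0) x y) (v.add x) (c + 1) := by
  simp only [bfsA, nbrsAll]
  split_ifs <;> simp_all [runSeq]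

theorem dims_bfsA (f : Nat) : ∀ (g : List (List Int)) (x y : Int) (v : PySem.Set Int) (c : Int),
    (bfsA f g x y v c).1.length = g.length ∧ pvW (bfsA f g x y v c).1 = pvW g := by
  induction f with
  | zero => intro g x y v c; simp [bfsA]
  | succ f ih =>
    have hW : ∀ g x y (v : PySem.Set Int) (c : Int), pvW (bfsA f g x y v c).1 = pvW g :=
      fun g x y v c => (ih g x y v c).2
    have hrun : ∀ (L : List (Int × Int)) (g : List (List Int)) (v : PySem.Set Int) (c : Int),
        (runSeq f g L v c).1.length = g.length ∧ pvW (runSeq f g L v c).1 = pvW g := by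
      intro L
      induction L with
      | nil => intro g v c; simp [runSeq]
      | cons p L ihL =>
        intro g v c
        obtain ⟨px, py⟩ := p
        simp only [runSeq]
        split
        · have h1 := ih g px py v c
          have h2 := ihL (bfsA f g px py v c).1 (bfsA f g px py v c).2.1 (bfsA f g px py v c).2.2
          exact ⟨h2.1.trans h1.1, h2.2.trans h1.2⟩
        · exact ihL g v c
    intro g x y v c
    rw [bfsA_unfold_aux f hW]
    have h1 := hrun (nbrsAll (pvSetCell g y x 0) x y) (pvSetCell g y x 0) (v.add x) (c + 1)
    have h2 := dims_setCell g y x 0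
    exact ⟨h1.1.trans h2.1, h1.2.trans h2.2⟩


theorem bfsA_unfold (f : Nat) (g : List (List Int)) (x y : Int) (v : PySem.Set Int) (c : Int) :
    bfsA (f + 1) g x y v c =
      runSeq f (pvSetCell g y x 0) (nbrsAll (pvSetCell g y x 0) x y) (v.add x) (c + 1) :=
  bfsA_unfold_aux f (fun g x y v c => (dims_bfsA f g x y v c).2) g x y v c

theorem gext_bfsA (f : Nat) : ∀ (g : List (List Int)) (x y : Int) (v : PySem.Set Int) (c : Int),
    GExt g (bfsA f g x y v c).1 := by
  induction f with
  | zero => intro g x y v c; exact gext_refl g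
  | succ f ih =>
    have hrun : ∀ (L : List (Int × Int)) (g : List (List Int)) (v : PySem.Set Int) (c : Int),
        GExt g (runSeq f g L v c).1 := by
      intro L
      induction L with
      | nil => intro g v c; exact gext_refl g
      | cons p L ihL =>
        intro g v c
        obtain ⟨px, py⟩ := p
        simp only [runSeq]
        split
        · exact gext_trans (ih g px py v c) (ihL _ _ _)
        · exact ihL g v c
    intro g x y v c
    rw [bfsA_unfold]
    exact gext_trans (gext_setCell g y x) (hrun _ _ _ _)

theorem nz_bfsA_le (f : Nat) : ∀ (g : List (List Int)) (x y : Int) (v : PySem.Set Int) (c : Int),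
    nz (bfsA f g x y v c).1 ≤ nz g := by
  induction f with
  | zero => intro g x y v c; simp [bfsA]
  | succ f ih =>
    have hrun : ∀ (L : List (Int × Int)) (g : List (List Int)) (v : PySem.Set Int) (c : Int),
        nz (runSeq f g L v c).1 ≤ nz g := by
      intro L
      induction L with
      | nil => intro g v c; simp [runSeq]
      | cons p L ihL =>
        intro g v c
        obtain ⟨px, py⟩ := p
        simp only [runSeq]
        split
        · exact le_trans (ihL _ _ _) (ih g px py v c)
        · exact ihL g v c
    intro g x y v c
    rw [bfsA_unfold]
    exact le_trans (hrun _ _ _ _) (nz_setCell_le g y x)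

theorem nz_runSeq_le (f : Nat) (L : List (Int × Int)) :
    ∀ (g : List (List Int)) (v : PySem.Set Int) (c : Int), nz (runSeq f g L v c).1 ≤ nz g := by
  induction L with
  | nil => intro g v c; simp [runSeq]
  | cons p L ihL =>
    intro g v c
    obtain ⟨px, py⟩ := p
    simp only [runSeq]
    split
    · exact le_trans (ihL _ _ _) (nz_bfsA_le f g px py v c)
    · exact ihL g v c

theorem bfsA_fuel (n : Nat) : ∀ (g : List (List Int)) (x y : Int) (v : PySem.Set Int) (c : Int)
    (f1 f2 : Nat), pvCell g y x ≠ 0 → nz g ≤ n → n < f1 → n < f2 →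
    bfsA f1 g x y v c = bfsA f2 g x y v c := by
  induction n using Nat.strong_induction_on with
  | _ n IH =>
    intro g x y v c f1 f2 hcell hnz hf1 hf2
    obtain ⟨a, rfl⟩ : ∃ a, f1 = a + 1 := ⟨f1 - 1, by omega⟩
    obtain ⟨b, rfl⟩ : ∃ b, f2 = b + 1 := ⟨f2 - 1, by omega⟩
    rw [bfsA_unfold, bfsA_unfold]
    have hg1 : nz (pvSetCell g y x 0) < nz g := nz_setCell_lt g y x hcell
    have hn1 : 1 ≤ n := by
      have := nz_pos g y x hcell; omega
    have key : ∀ (L : List (Int × Int)) (g' : List (List Int)) (v' : PySem.Set Int) (c' : Int),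
        nz g' ≤ n - 1 → runSeq a g' L v' c' = runSeq b g' L v' c' := by
      intro L
      induction L with
      | nil => intro g' v' c' _; simp [runSeq]
      | cons p L ihL =>
        intro g' v' c' hg'
        obtain ⟨px, py⟩ := p
        simp only [runSeq]
        split
        · next hcell' =>
          have he : bfsA a g' px py v' c' = bfsA b g' px py v' c' := by
            apply IH (n - 1) (by omega) g' px py v' c' a b (by rw [hcell']; decide) hg'
              (by omega) (by omega)
          rw [he]
          exact ihL _ _ _ (le_trans (nz_bfsA_le b g' px py v' c') hg')
        · exact ihL g' v' c' hg'
    exact key _ _ _ _ (by omega)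

theorem runSeq_fuel (L : List (Int × Int)) :
    ∀ (g : List (List Int)) (v : PySem.Set Int) (c : Int) (f1 f2 : Nat),
    nz g < f1 → nz g < f2 → runSeq f1 g L v c = runSeq f2 g L v c := by
  induction L with
  | nil => intro g v c f1 f2 _ _; simp [runSeq]
  | cons p L ihL =>
    intro g v c f1 f2 h1 h2
    obtain ⟨px, py⟩ := p
    simp only [runSeq]
    split
    · next hcell =>
      have he : bfsA f1 g px py v c = bfsA f2 g px py v c :=
        bfsA_fuel (nz g) g px py v c f1 f2 (by rw [hcell]; decide) le_rfl h1 h2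
      rw [he]
      exact ihL _ _ _ _ _ (Nat.lt_of_le_of_lt (nz_bfsA_le f2 g px py v c) h1)
        (Nat.lt_of_le_of_lt (nz_bfsA_le f2 g px py v c) h2)
    · exact ihL g v c f1 f2 h1 h2

theorem runSeq_append (f : Nat) (L1 L2 : List (Int × Int)) :
    ∀ (g : List (List Int)) (v : PySem.Set Int) (c : Int),
    runSeq f g (L1 ++ L2) v c =
      runSeq f (runSeq f g L1 v c).1 L2 (runSeq f g L1 v c).2.1 (runSeq f g L1 v c).2.2 := by
  induction L1 with
  | nil => intro g v c; simp [runSeq]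
  | cons p L1 ihL =>
    intro g v c
    obtain ⟨px, py⟩ := p
    simp only [List.cons_append, runSeq]
    split
    · exact ihL _ _ _
    · exact ihL g v c

theorem gext_cell_ne_one {g g' : List (List Int)} (h : GExt g g') {y x : Int}
    (hne : pvCell g y x ≠ 1) : pvCell g' y x ≠ 1 := by
  rcases h y x with he | he
  · rw [he]; exact hne
  · rw [he]; decide

theorem runSeq_filter (f : Nat) (g : List (List Int)) :
    ∀ (L : List (Int × Int)) (g' : List (List Int)) (v : PySem.Set Int) (c : Int), GExt g g' →
    runSeq f g' (L.filter (fun p => pvCell g p.2 p.1 == 1)) v c = runSeq f g' L v c := by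
  intro L
  induction L with
  | nil => intro g' v c _; rfl
  | cons p L ihL =>
    intro g' v c hext
    obtain ⟨px, py⟩ := p
    by_cases hp : pvCell g py px = 1
    · rw [List.filter_cons_of_pos (by simpa using hp)]
      simp only [runSeq]
      split
      · exact ihL _ _ _ (gext_trans hext (gext_bfsA f g' px py _ _))
      · exact ihL _ _ _ hext
    · rw [List.filter_cons_of_neg (by simpa using hp)]
      have : pvCell g' py px ≠ 1 := gext_cell_ne_one hext hp
      conv_rhs => rw [runSeq]
      rw [if_neg this]
      exact ihL _ _ _ hext

theorem pushes_shape {α : Type} (A1 A2 A3 A4 : Prop) [Decidable A1] [Decidable A2] [Decidable A3]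
    [Decidable A4] (a1 a2 a3 a4 : α) (S : List α) :
    (if A1 then a1 ::
      (if A2 then a2 ::
        (if A3 then a3 :: (if A4 then a4 :: S else S) else (if A4 then a4 :: S else S))
       else (if A3 then a3 :: (if A4 then a4 :: S else S) else (if A4 then a4 :: S else S)))
     else
      (if A2 then a2 ::
        (if A3 then a3 :: (if A4 then a4 :: S else S) else (if A4 then a4 :: S else S))
       else (if A3 then a3 :: (if A4 then a4 :: S else S) else (if A4 then a4 :: S else S))))
    = (if A1 then [a1] else []) ++ (if A2 then [a2] else []) ++ (if A3 then [a3] else []) ++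
      (if A4 then [a4] else []) ++ S := by
  split_ifs <;> simp

theorem nbrs_filter (g' : List (List Int)) (cx cy : Int) :
    (if cy < ((g'.length : Int)) - 1 ∧ pvCell g' (cy+1) cx = 1 then [(cx, cy+1)] else []) ++
    (if 0 < cy ∧ pvCell g' (cy-1) cx = 1 then [(cx, cy-1)] else []) ++
    (if 0 < cx ∧ pvCell g' cy (cx-1) = 1 then [(cx-1, cy)] else []) ++
    (if cx < ((pvW g' : Int)) - 1 ∧ pvCell g' cy (cx+1) = 1 then [(cx+1, cy)] else []) ++ S
    = ((nbrsAll g' cx cy).filter (fun p => pvCell g' p.2 p.1 == 1)) ++ S := by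
  simp only [nbrsAll, List.filter_append]
  split_ifs <;> simp_all

theorem flood_eq_runSeq (n : Nat) : ∀ (S : List (Int × Int)) (g : List (List Int))
    (v : PySem.Set Int) (c : Int) (f : Nat), nz g ≤ n → n < f → inv g S →
    floodB g S v c = runSeq f g S v c := by
  induction n using Nat.strong_induction_on with
  | _ n IH =>
    intro S
    induction S with
    | nil => intro g v c f _ _ _; simp [floodB, runSeq]
    | cons p S ihS =>
      intro g v c f hnz hf hinv
      obtain ⟨cx, cy⟩ := p
      by_cases hc : pvCell g cy cx = 0
      · conv_lhs => rw [floodB.eq_def]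
        simp only [dif_pos hc]
        rw [runSeq, if_neg (by rw [hc]; decide)]
        exact ihS g v c f hnz hf (fun q hq => hinv q (List.mem_cons_of_mem _ hq))
      · have hc1 : pvCell g cy cx = 1 := by
          rcases hinv (cx, cy) List.mem_cons_self with h | h
          · exact absurd h hc
          · exact h
        have hnzpos : 1 ≤ nz g := nz_pos g cy cx hc
        obtain ⟨f', rfl⟩ : ∃ f', f = f' + 1 := ⟨f - 1, by omega⟩
        have hglt : nz (pvSetCell g cy cx 0) < nz g := nz_setCell_lt g cy cx hc
        have hext : GExt g (pvSetCell g cy cx 0) := gext_setCell g cy cx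
        conv_lhs => rw [floodB.eq_def]
        simp only [dif_neg hc]
        rw [pushes_shape, nbrs_filter]
        have hinv' : inv (pvSetCell g cy cx 0)
            (((nbrsAll (pvSetCell g cy cx 0) cx cy).filter
              (fun p => pvCell (pvSetCell g cy cx 0) p.2 p.1 == 1)) ++ S) := by
          intro q hq
          rcases List.mem_append.1 hq with hq1 | hq2
          · right
            have := (List.mem_filter.1 hq1).2
            simpa using this
          · rcases hinv q (List.mem_cons_of_mem _ hq2) with h0 | h1
            · rcases hext q.2 q.1 with he | he
              · rw [he]; exact Or.inl h0
              · exact Or.inl he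
            · rcases hext q.2 q.1 with he | he
              · rw [he]; exact Or.inr h1
              · exact Or.inl he
        rw [IH (n - 1) (by omega) _ _ _ _ f' (by omega) (by omega) hinv']
        rw [runSeq_append]
        rw [runSeq_filter f' (pvSetCell g cy cx 0) _ _ _ _ (gext_refl _)]
        conv_rhs => rw [runSeq]
        rw [if_pos hc1]
        rw [bfsA_unfold]
        have hT := nz_runSeq_le f' (nbrsAll (pvSetCell g cy cx 0) cx cy)
          (pvSetCell g cy cx 0) (v.add cx) (c + 1)
        exact runSeq_fuel S _ _ _ f' (f' + 1) (by omega) (by omega)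

theorem seed_eq (g : List (List Int)) (x y : Int) (v : PySem.Set Int) (c : Int)
    (h : pvCell g y x ≠ 0) :
    floodB g [(x, y)] v c = bfsA (nz g + 1) g x y v c := by
  have hglt : nz (pvSetCell g y x 0) < nz g := nz_setCell_lt g y x h
  conv_lhs => rw [floodB.eq_def]
  simp only [dif_neg h]
  rw [pushes_shape, nbrs_filter]
  have hinv' : inv (pvSetCell g y x 0)
      (((nbrsAll (pvSetCell g y x 0) x y).filter
        (fun p => pvCell (pvSetCell g y x 0) p.2 p.1 == 1)) ++ []) := by
    intro q hq
    rcases List.mem_append.1 hq with hq1 | hq2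
    · right
      have := (List.mem_filter.1 hq1).2
      simpa using this
    · simp at hq2
  rw [flood_eq_runSeq (nz (pvSetCell g y x 0)) _ _ _ _ (nz g) le_rfl hglt hinv']
  rw [List.append_nil]
  rw [runSeq_filter (nz g) (pvSetCell g y x 0) _ _ _ _ (gext_refl _)]
  rw [bfsA_unfold]

theorem inner_step_eq (y : Nat) :
    (fun (st2 : List (List Int) × List Int) (x : Nat) =>
      if pvCell st2.1 (y : Int) (x : Int) = 0 then st2
      else
        let r := bfsA (nz st2.1 + 1) st2.1 (x : Int) (y : Int) PySem.Set.empty 0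
        (r.1, r.2.1.foldl (fun arr i => pvAddAt arr (i - 1) r.2.2) st2.2))
    = (fun (st2 : List (List Int) × List Int) (x : Nat) =>
      if pvCell st2.1 (y : Int) (x : Int) = 0 then st2
      else
        let r := floodB st2.1 [((x : Int), (y : Int))] PySem.Set.empty 0
        (r.1, r.2.1.foldl (fun arr c => pvAddAt arr (c - 1) r.2.2) st2.2)) := by
  funext st2 x
  by_cases hc : pvCell st2.1 (y : Int) (x : Int) = 0
  · simp only [if_pos hc]
  · simp only [if_neg hc]
    rw [seed_eq st2.1 (x : Int) (y : Int) _ _ hc]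

theorem inner_pvW (y : Nat) : ∀ (xs : List Nat) (st : List (List Int) × List Int),
    pvW ((xs.foldl (fun (st2 : List (List Int) × List Int) (x : Nat) =>
      if pvCell st2.1 (y : Int) (x : Int) = 0 then st2
      else
        let r := floodB st2.1 [((x : Int), (y : Int))] PySem.Set.empty 0
        (r.1, r.2.1.foldl (fun arr c => pvAddAt arr (c - 1) r.2.2) st2.2)) st)).1 = pvW st.1 := by
  intro xs
  induction xs with
  | nil => intro st; rfl
  | cons x xs ih =>
    intro st
    rw [List.foldl_cons]
    rw [ih]
    by_cases hc : pvCell st.1 (y : Int) (x : Int) = 0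
    · simp only [if_pos hc]
    · simp only [if_neg hc]
      rw [seed_eq st.1 (x : Int) (y : Int) _ _ hc]
      exact (dims_bfsA _ _ _ _ _ _).2

theorem outer_eq (w : Nat) : ∀ (ys : List Nat) (st : List (List Int) × List Int),
    pvW st.1 = w →
    ys.foldl (fun st (y : Nat) => (List.range (pvW st.1)).foldl
      (fun (st2 : List (List Int) × List Int) (x : Nat) =>
        if pvCell st2.1 (y : Int) (x : Int) = 0 then st2
        else
          let r := bfsA (nz st2.1 + 1) st2.1 (x : Int) (y : Int) PySem.Set.empty 0
          (r.1, r.2.1.foldl (fun arr i => pvAddAt arr (i - 1) r.2.2) st2.2)) st) st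
    = ys.foldl (fun st (y : Nat) => (List.range w).foldl
      (fun (st2 : List (List Int) × List Int) (x : Nat) =>
        if pvCell st2.1 (y : Int) (x : Int) = 0 then st2
        else
          let r := floodB st2.1 [((x : Int), (y : Int))] PySem.Set.empty 0
          (r.1, r.2.1.foldl (fun arr c => pvAddAt arr (c - 1) r.2.2) st2.2)) st) st := by
  intro ys
  induction ys with
  | nil => intro st _; rfl
  | cons y ys ih =>
    intro st hW
    rw [List.foldl_cons, List.foldl_cons]
    rw [hW, inner_step_eq y]
    apply ih
    rw [inner_pvW y]
    exact hW

-- ===== VERDICT (by name: the statement is the Claim_ definition above) =====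
theorem solution_spec : Claim_equal_solution := by
  unfold Claim_equal_solution Spec_solution
  intro land _ _
  unfold solution solution_alt
  have h := outer_eq (pvW land) (List.range land.length)
    (land, List.replicate (pvW land) (0 : Int)) rfl
  rw [h]
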